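-- pv_equiv track=rewrite | github.com/chailab-umich/BeyondBinary-ParaphasiaDetection | AphasiaBank/helper_scripts/evaluation.py | prepare_AWER_seq
-- ===== SOURCE A (Python) =====
-- def prepare_AWER_seq(asr_para_seq):
--     # concat <word> and <para>
--     all_seqs = []
--     for seq in asr_para_seq:
--         new_seq = []
--         for w in seq:
--             if w.startswith("[") and w.endswith("]"):
--                 new_seq[-1] = new_seq[-1] + f"/{w[1:-1]}"
--             elif w == "<eps>":
--                 continue
--             else:
--                 new_seq.append(w)
--         all_seqs.append(new_seq)
--     return all_seqs
-- ===== SOURCE B (Python) =====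
-- def prepare_AWER_seq(asr_para_seq):
--     # two staged passes per sequence: first drop every '<eps>', then chunk the
--     # filtered list into a word plus its immediately following '[...]' tags,
--     # emitting 'word/t1/t2/...' per chunk (index scan, no in-place rewriting)
--     all_seqs = []
--     for seq in asr_para_seq:
--         toks = [w for w in seq if w != "<eps>"]
--         new_seq = []
--         i = 0
--         while i < len(toks):
--             word = toks[i]
--             j = i + 1
--             while j < len(toks) and toks[j].startswith("[") and toks[j].endswith("]"):
--                 word = word + "/" + toks[j][1:-1]
--                 j += 1
--             new_seq.append(word)
--             i = j
--         all_seqs.append(new_seq)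
--     return all_seqs
-- ===== Notes on version B (the rewrite author's own statement) =====
-- stated objective: alternative
-- what changed: B splits A's single interleaved pass into two stages: a filter pass removing '<eps>' tokens, then a chunking scan that groups each word with its run of following '[...]' tags and emits the joined string once, instead of A's repeated rewriting of new_seq[-1].
-- outside the precondition, e.g. on prepare_AWER_seq([['[x]', 'a']]): A raises IndexError, B returns [['[x]', 'a']]
import Mathlib
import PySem

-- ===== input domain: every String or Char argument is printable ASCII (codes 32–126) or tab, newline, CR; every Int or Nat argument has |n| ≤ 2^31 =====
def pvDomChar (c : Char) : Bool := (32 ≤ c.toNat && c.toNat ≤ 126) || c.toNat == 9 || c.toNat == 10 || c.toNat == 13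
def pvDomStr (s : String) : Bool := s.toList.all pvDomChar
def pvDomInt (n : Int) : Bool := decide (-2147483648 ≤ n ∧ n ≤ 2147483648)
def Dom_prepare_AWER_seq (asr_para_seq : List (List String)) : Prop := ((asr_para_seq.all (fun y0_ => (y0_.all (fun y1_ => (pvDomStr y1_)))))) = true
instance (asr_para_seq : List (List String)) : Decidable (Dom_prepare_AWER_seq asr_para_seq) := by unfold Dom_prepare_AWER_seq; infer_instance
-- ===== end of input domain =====

-- B replaces A's single interleaved pass (rewriting new_seq[-1] per bracket tag) by two
-- staged passes: filter out '<eps>', then chunk each word with its run of following tags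
-- (objective: alternative). Return-value equivalence only; neither mutates its argument.

-- w.startswith("[") and w.endswith("]")
def pvIsBr (w : String) : Bool := PySem.Str.startswith w "[" && PySem.Str.endswith w "]"

-- ===== PORT A =====
-- inner loop body of A; the bracket branch on an empty new_seq is where Python raises
-- IndexError (excluded by Pre_); the total completion used there is immaterial to the claim
def pvStepA (new_seq : List String) (w : String) : List String :=
  if pvIsBr w then
    new_seq.dropLast ++ [new_seq.getLastD "" ++ "/" ++ PySem.Str.slice w (some 1) (some (-1))]
  else if w == "<eps>" then new_seq
  else new_seq ++ [w]

def prepare_AWER_seq (asr_para_seq : List (List String)) : List (List String) :=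
  asr_para_seq.map (fun seq => seq.foldl pvStepA [])

-- ===== PORT B =====
-- word = word + "/" + t[1:-1]
def pvMerge (word t : String) : String := word ++ "/" ++ PySem.Str.slice t (some 1) (some (-1))

-- the index scan of Source B: take the head word, fold the run of following bracket tags onto
-- it (the inner while), continue after that run (i = j)
def pvChunks : List String → List String
  | [] => []
  | word :: rest =>
      ((rest.takeWhile pvIsBr).foldl pvMerge word) :: pvChunks (rest.dropWhile pvIsBr)
termination_by l => l.length
decreasing_by
  simpa using Nat.lt_succ_of_le (List.length_dropWhile_le pvIsBr rest)

def prepare_AWER_seq_alt (asr_para_seq : List (List String)) : List (List String) :=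
  asr_para_seq.map (fun seq => pvChunks (seq.filter (fun w => w != "<eps>")))

-- ===== PRECONDITION & SPEC =====
-- Pre_ excludes exactly the inputs on which Python A raises IndexError: a sequence whose
-- first non-"<eps>" token is a bracketed "[...]" tag (new_seq[-1] on an empty list).
def pvSeqOK (seq : List String) : Bool :=
  match seq.filter (fun w => w != "<eps>") with
  | [] => true
  | w :: _ => !pvIsBr w

def Pre_prepare_AWER_seq (asr_para_seq : List (List String)) : Prop :=
  asr_para_seq.all pvSeqOK = true
instance (asr_para_seq : List (List String)) : Decidable (Pre_prepare_AWER_seq asr_para_seq) := by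
  unfold Pre_prepare_AWER_seq; infer_instance

def pvWitness_prepare_AWER_seq : List (List String) := [["a", "[x]", "<eps>", "[y]", "b"]]

def Spec_prepare_AWER_seq (asr_para_seq : List (List String)) (out : List (List String)) : Prop := out = prepare_AWER_seq_alt asr_para_seq
instance (asr_para_seq : List (List String)) (out : List (List String)) : Decidable (Spec_prepare_AWER_seq asr_para_seq out) := by unfold Spec_prepare_AWER_seq; infer_instance

-- ===== CLAIM (what is proved, stated in full; the proofs are below) =====
def Claim_equal_prepare_AWER_seq : Prop := ∀ (asr_para_seq : List (List String)), Dom_prepare_AWER_seq asr_para_seq → Pre_prepare_AWER_seq asr_para_seq → Spec_prepare_AWER_seq asr_para_seq (prepare_AWER_seq asr_para_seq)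

-- ===== LEMMAS AND PROOFS =====

lemma pvStepA_eps (acc : List String) : pvStepA acc "<eps>" = acc := by
  simp [pvStepA, show pvIsBr "<eps>" = false from by decide]

-- A's '<eps>' branch is a no-op, so A's fold equals its fold over B's filtered list
lemma pv_foldA_filter (seq : List String) : ∀ acc : List String,
    seq.foldl pvStepA acc = (seq.filter (fun w => w != "<eps>")).foldl pvStepA acc := by
  induction seq with
  | nil => intro acc; rfl
  | cons w s ih =>
    intro acc
    by_cases hw : w = "<eps>"
    · subst hw
      simp [List.foldl_cons, pvStepA_eps, ih acc]
    · have hne : (w != "<eps>") = true := by simp [hw]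
      simp [hne, List.foldl_cons, ih]

-- over a run of bracket tags, A's fold rewrites the last element exactly as B's merge fold
lemma pv_foldA_tags (ts : List String) : ∀ acc word, (∀ t ∈ ts, pvIsBr t = true) →
    ts.foldl pvStepA (acc ++ [word]) = acc ++ [ts.foldl pvMerge word] := by
  induction ts with
  | nil => intro acc word _; rfl
  | cons t ts ih =>
    intro acc word hts
    have hbr : pvIsBr t = true := hts t (by simp)
    have hstep : pvStepA (acc ++ [word]) t = acc ++ [pvMerge word t] := by
      simp [pvStepA, hbr, pvMerge, String.append_assoc]
    rw [List.foldl_cons, hstep, ih acc (pvMerge word t) (fun u hu => hts u (by simp [hu]))]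
    rfl

-- main invariant: on an eps-free list whose head is not a bracket tag, A's fold
-- appends exactly B's chunks
lemma pv_foldA_chunks : ∀ toks : List String, (∀ w ∈ toks, w ≠ "<eps>") →
    (toks = [] ∨ ∃ w r, toks = w :: r ∧ pvIsBr w = false) →
    ∀ acc : List String, toks.foldl pvStepA acc = acc ++ pvChunks toks := by
  intro toks
  induction toks using pvChunks.induct with
  | case1 => intro _ _ acc; simp [pvChunks]
  | case2 word rest ih =>
    intro heps hhd acc
    have hw : pvIsBr word = false := by
      rcases hhd with h | ⟨w, r, hwr, hbr⟩
      · simp at h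
      · rw [List.cons.injEq] at hwr; exact hwr.1 ▸ hbr
    have hwne : word ≠ "<eps>" := heps word (by simp)
    have hstep : pvStepA acc word = acc ++ [word] := by
      simp [pvStepA, hw, hwne]
    rw [List.foldl_cons, hstep]
    rw [← List.takeWhile_append_dropWhile (p := pvIsBr) (l := rest), List.foldl_append]
    rw [pv_foldA_tags _ acc word (fun t ht => List.mem_takeWhile_imp ht)]
    have hepsd : ∀ w ∈ rest.dropWhile pvIsBr, w ≠ "<eps>" := fun w hwm =>
      heps w (List.mem_cons_of_mem _ ((List.dropWhile_sublist pvIsBr).subset hwm))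
    have hhdd : rest.dropWhile pvIsBr = [] ∨
        ∃ w r, rest.dropWhile pvIsBr = w :: r ∧ pvIsBr w = false := by
      cases hd : rest.dropWhile pvIsBr with
      | nil => exact Or.inl rfl
      | cons x xs =>
        refine Or.inr ⟨x, xs, rfl, ?_⟩
        have h := List.head?_dropWhile_not pvIsBr rest
        rw [hd] at h
        simpa using h
    rw [ih hepsd hhdd]
    simp [pvChunks]

lemma pv_seq_eq (seq : List String) (h : pvSeqOK seq = true) :
    seq.foldl pvStepA [] = pvChunks (seq.filter (fun w => w != "<eps>")) := by
  rw [pv_foldA_filter]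
  have heps : ∀ w ∈ seq.filter (fun w => w != "<eps>"), w ≠ "<eps>" := by
    intro w hw
    have := (List.mem_filter.mp hw).2
    simpa using this
  have hhd : seq.filter (fun w => w != "<eps>") = [] ∨
      ∃ w r, seq.filter (fun w => w != "<eps>") = w :: r ∧ pvIsBr w = false := by
    unfold pvSeqOK at h
    cases hf : seq.filter (fun w => w != "<eps>") with
    | nil => exact Or.inl rfl
    | cons x xs =>
      rw [hf] at h
      exact Or.inr ⟨x, xs, rfl, by simpa using h⟩
  simpa using pv_foldA_chunks _ heps hhd []

-- ===== VERDICT (by name: the statement is the Claim_ definition above) =====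
theorem prepare_AWER_seq_spec : Claim_equal_prepare_AWER_seq := by
  intro l _ hpre
  unfold Spec_prepare_AWER_seq prepare_AWER_seq prepare_AWER_seq_alt
  apply List.map_congr_left
  intro seq hseq
  exact pv_seq_eq seq ((List.all_eq_true.mp hpre) seq hseq)
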